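-- pv_equiv track=rewrite | github.com/Kbalazs3/The-Keymaker-Python | keymaker.py | get_square_index_chars
-- ===== SOURCE A (Python) =====
-- def get_square_index_chars(word):
--     square_shifted_word = ""
--     for char in word:
--         index = word.index(char)
--         index = index * index
--         if index > len(word) - 1:
--             break
--         elif index <= len(word) - 1:
--             square_shifted_word += word[index]
--     return square_shifted_word
-- ===== SOURCE B (Python) =====
-- def get_square_index_chars(word):
--     # The loop in A breaks exactly when the char's first occurrence exceeds
--     # t = isqrt(n-1), i.e. when the char does not occur in word[:t+1].
--     n = len(word)
--     if n == 0:
--         return ""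
--     t = 0
--     while (t + 1) * (t + 1) <= n - 1:
--         t += 1
--     prefix = word[:t + 1]
--     cut = n
--     for i in range(t + 1, n):
--         if word[i] not in prefix:
--             cut = i
--             break
--     return ''.join(word[prefix.index(c) ** 2] for c in word[:cut])
-- ===== Notes on version B (the rewrite author's own statement) =====
-- stated objective: alternative
-- what changed: A checks each char's squared first-occurrence index against n-1 inside one break-loop; B reformulates the break condition arithmetically: it computes t = isqrt(n-1) once, takes the prefix word[:t+1], finds the cut as the first position whose char is absent from that prefix (pure membership test, no squares in the control flow), and only then emits word[prefix.index(c)**2] for the kept chars.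
import Mathlib
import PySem

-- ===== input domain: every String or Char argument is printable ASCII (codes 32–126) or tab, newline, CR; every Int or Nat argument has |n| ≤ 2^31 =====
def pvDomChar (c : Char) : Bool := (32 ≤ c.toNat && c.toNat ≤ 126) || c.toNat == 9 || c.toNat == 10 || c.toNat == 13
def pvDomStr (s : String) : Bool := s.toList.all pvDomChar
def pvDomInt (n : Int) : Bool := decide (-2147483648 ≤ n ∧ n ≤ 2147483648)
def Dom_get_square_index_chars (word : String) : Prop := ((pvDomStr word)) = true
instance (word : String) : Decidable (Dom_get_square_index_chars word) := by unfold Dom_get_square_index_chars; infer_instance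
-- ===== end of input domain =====

-- B replaces A's per-char squared-index bound check by an arithmetic reformulation:
-- the break fires exactly when the char is absent from the prefix word[:isqrt(n-1)+1].

-- ===== PORT A =====
-- the for-loop with break: chars still to process, accumulated output characters
def pvALoop (full : List Char) : List Char → List Char → List Char
  | [], acc => acc
  | c :: rest, acc =>
      let index : Int := (((PySem.List.index? full c).getD 0 : Nat) : Int)
      let index := index * index
      if index > (full.length : Int) - 1 then acc
      else pvALoop full rest (acc ++ [PySem.List.pyGetD full index ' '])

def get_square_index_chars (word : String) : String :=
  String.ofList (pvALoop word.toList word.toList [])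

-- ===== PORT B =====
-- while (t + 1) * (t + 1) <= n - 1: t += 1   (fuel = n, more iterations than the loop can run)
def pvIsqrtLoop (m : Int) : Nat → Nat → Nat
  | 0, t => t
  | fuel+1, t => if ((t : Int) + 1) * ((t : Int) + 1) ≤ m then pvIsqrtLoop m fuel (t + 1) else t

-- for i in range(t + 1, n): if word[i] not in prefix: cut = i; break
-- ('c in str' for the single char word[i] is exactly list membership)
def pvCutLoop (wl pre : List Char) : List Int → Int → Int
  | [], cut => cut
  | i :: rest, cut =>
      if !(pre.contains (PySem.List.pyGetD wl i ' ')) then i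
      else pvCutLoop wl pre rest cut

def get_square_index_chars_alt (word : String) : String :=
  let wl := word.toList
  let n : Int := (wl.length : Int)
  if wl.length = 0 then "" else
  let t := pvIsqrtLoop (n - 1) wl.length 0
  let pre := wl.take (t + 1)                    -- word[:t+1], t+1 ≥ 1 so the slice is take
  let cut := pvCutLoop wl pre (PySem.List.pyRange ((t : Int) + 1) n 1) n
  -- prefix.index(c) on the single char c is the first-occurrence list index
  String.ofList ((wl.take cut.toNat).map (fun c =>
    let k : Int := (((PySem.List.index? pre c).getD 0 : Nat) : Int)
    PySem.List.pyGetD wl (k * k) ' '))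

-- ===== PRECONDITION & SPEC =====
def Spec_get_square_index_chars (word : String) (out : String) : Prop := out = get_square_index_chars_alt word
instance (word : String) (out : String) : Decidable (Spec_get_square_index_chars word out) := by unfold Spec_get_square_index_chars; infer_instance

-- ===== CLAIM (what is proved, stated in full; the proofs are below) =====
def Claim_equal_get_square_index_chars : Prop := ∀ (word : String), Dom_get_square_index_chars word → Spec_get_square_index_chars word (get_square_index_chars word)

-- ===== LEMMAS AND PROOFS =====

-- A's break-loop appends the takeWhile-image of the squared first-occurrence indices
theorem pv_loop_eq (full : List Char) (cs : List Char) : ∀ (acc : List Char),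
    pvALoop full cs acc = acc ++
      (cs.takeWhile (fun c =>
          !(decide ((((PySem.List.index? full c).getD 0 : Nat) : Int) *
                    (((PySem.List.index? full c).getD 0 : Nat) : Int) > (full.length : Int) - 1)))).map
        (fun c => PySem.List.pyGetD full
          ((((PySem.List.index? full c).getD 0 : Nat) : Int) *
           (((PySem.List.index? full c).getD 0 : Nat) : Int)) ' ') := by
  induction cs with
  | nil => intro acc; simp [pvALoop]
  | cons c rest ih =>
    intro acc
    rw [pvALoop]
    simp only [List.takeWhile_cons]
    set s : Int := (((PySem.List.index? full c).getD 0 : Nat) : Int) *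
                   (((PySem.List.index? full c).getD 0 : Nat) : Int) with hs
    by_cases h : s > (full.length : Int) - 1
    · rw [if_pos h]; simp [h]
    · rw [if_neg h, ih]
      have hb : (!decide (s > (full.length : Int) - 1)) = true := by
        rw [decide_eq_false h]; rfl
      rw [hb, if_pos rfl]
      rw [hs]
      simp

-- isqrt-loop invariant
theorem pv_isqrt_spec (m : Int) : ∀ (fuel t : Nat),
    (t : Int) * t ≤ m → m < ((t : Int) + fuel + 1) * ((t : Int) + fuel + 1) →
    ((pvIsqrtLoop m fuel t : Int) * (pvIsqrtLoop m fuel t : Int) ≤ m ∧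
     m < ((pvIsqrtLoop m fuel t : Int) + 1) * ((pvIsqrtLoop m fuel t : Int) + 1)) := by
  intro fuel
  induction fuel with
  | zero => intro t h1 h2; exact ⟨h1, by rw [pvIsqrtLoop]; push_cast at h2 ⊢; linarith⟩
  | succ fuel ih =>
    intro t h1 h2
    rw [pvIsqrtLoop]
    by_cases h : ((t : Int) + 1) * ((t : Int) + 1) ≤ m
    · rw [if_pos h]
      exact ih (t + 1) (by push_cast at h ⊢; linarith)
        (by push_cast at h2 ⊢; linarith)
    · rw [if_neg h]; exact ⟨h1, by linarith [lt_of_not_ge h]⟩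

-- takeWhile characterised by the first failing index
theorem pv_takeWhile_len {p : Char → Bool} : ∀ (l : List Char) (a : Nat),
    a ≤ l.length → (∀ j (_ : j < a) (hj' : j < l.length), p l[j]) →
    (a = l.length ∨ ∃ h : a < l.length, ¬ p l[a]) →
    (l.takeWhile p).length = a := by
  intro l
  induction l with
  | nil =>
    intro a ha _ _
    simp only [List.length_nil] at ha
    simp only [List.takeWhile_nil, List.length_nil]
    omega
  | cons x rest ih =>
    intro a ha hall hend
    cases a with
    | zero =>
      rcases hend with h | ⟨h, hp⟩
      · simp at h
      · simp only [List.getElem_cons_zero] at hp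
        have hpf : p x = false := by revert hp; cases p x <;> simp
        simp [hpf]
    | succ a =>
      have hx : p x := by simpa using hall 0 (Nat.succ_pos a) (by simp)
      simp only [List.takeWhile_cons, hx, if_true, List.length_cons]
      congr 1
      apply ih a (by simpa using ha)
      · intro j hj hj'
        simpa using hall (j + 1) (by omega) (by simpa using hj')
      · rcases hend with h | ⟨h, hp⟩
        · left; simpa using h
        · right; exact ⟨by simpa using h, by simpa using hp⟩

-- the cut loop returns the length of the membership takeWhile
theorem pv_cut_eq (wl pre : List Char) (k : Nat) : ∀ (a : Nat),
    wl.length - a = k → a ≤ wl.length →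
    (∀ j (_ : j < a) (hj' : j < wl.length), pre.contains wl[j]) →
    pvCutLoop wl pre (PySem.List.pyRange (a : Int) (wl.length : Int) 1) (wl.length : Int)
      = ((wl.takeWhile (fun c => pre.contains c)).length : Int) := by
  induction k with
  | zero =>
    intro a hk ha hall
    have hae : a = wl.length := by omega
    rw [PySem.List.pyRange_one_eq_nil (by exact_mod_cast le_of_eq hae.symm)]
    rw [pvCutLoop, pv_takeWhile_len wl a ha hall (Or.inl hae), hae]
  | succ k ih =>
    intro a hk ha hall
    have halt : a < wl.length := by omega
    rw [PySem.List.pyRange_one_cons (by exact_mod_cast halt), pvCutLoop]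
    have hget : PySem.List.pyGetD wl (a : Int) ' ' = wl[a] := by
      rw [PySem.List.pyGetD_natCast]; exact List.getD_eq_getElem wl ' ' halt
    cases h : pre.contains wl[a] with
    | true =>
      rw [hget, h, if_neg (by simp)]
      have hcast : (a : Int) + 1 = ((a + 1 : Nat) : Int) := by push_cast; ring
      rw [hcast]
      exact ih (a + 1) (by omega) (by omega)
        (fun j hj hj' => by
          rcases Nat.lt_or_ge j a with h' | h'
          · exact hall j h' hj'
          · have hja : j = a := by omega
            subst hja; exact h)
    | false =>
      rw [hget, h, if_pos (by simp)]
      rw [pv_takeWhile_len wl a ha hall (Or.inr ⟨halt, by rw [h]; exact Bool.false_ne_true⟩)]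

-- membership in a take-prefix ↔ first-occurrence index below the bound
theorem pv_mem_take_iff : ∀ (l : List Char) (k : Nat) (c : Char), c ∈ l →
    (c ∈ l.take k ↔ ((List.idxOf? c l).getD 0) < k) := by
  intro l
  induction l with
  | nil => intro k c hc; simp at hc
  | cons x rest ih =>
    intro k c hc
    by_cases hx : x = c
    · have h0 : List.idxOf? c (x :: rest) = some 0 := by
        simp [List.idxOf?, List.findIdx?_cons, hx]
      rw [h0]
      simp only [Option.getD_some]
      cases k with
      | zero => simp
      | succ k => simp [List.take_succ_cons, hx]
    · have hcr : c ∈ rest := by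
        rcases List.mem_cons.mp hc with h | h
        · exact absurd h.symm hx
        · exact h
      have h1 : List.idxOf? c (x :: rest) = (List.idxOf? c rest).map (· + 1) := by
        simp [List.idxOf?, List.findIdx?_cons, hx]
      obtain ⟨j, hj⟩ := Option.isSome_iff_exists.mp (List.isSome_idxOf?.mpr hcr)
      rw [h1, hj]
      simp only [Option.map_some, Option.getD_some]
      cases k with
      | zero => simp
      | succ k =>
        have ihh := ih k c hcr
        rw [hj] at ihh
        simp only [Option.getD_some] at ihh
        simp only [List.take_succ_cons, List.mem_cons]
        constructor
        · intro h
          rcases h with h | h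
          · exact absurd h.symm hx
          · have := ihh.mp h
            omega
        · intro h
          right
          exact ihh.mpr (by omega)

-- takeWhile congruence on members
theorem pv_takeWhile_congr {p q : Char → Bool} : ∀ (l : List Char),
    (∀ x ∈ l, p x = q x) → l.takeWhile p = l.takeWhile q := by
  intro l
  induction l with
  | nil => intro _; rfl
  | cons x rest ih =>
    intro h
    have hx := h x (by simp)
    simp only [List.takeWhile_cons, hx]
    by_cases hq : q x
    · simp [hq, ih (fun y hy => h y (by simp [hy]))]
    · simp [hq]

-- ===== VERDICT (by name: the statement is the Claim_ definition above) =====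
theorem get_square_index_chars_spec : Claim_equal_get_square_index_chars := by
  intro word _
  unfold Spec_get_square_index_chars get_square_index_chars get_square_index_chars_alt
  simp only []
  set wl := word.toList with hwl
  by_cases hn0 : wl.length = 0
  · rw [if_pos hn0]
    rw [List.length_eq_zero_iff.mp hn0]
    rw [pvALoop]
  · rw [if_neg hn0]
    have hn1 : 1 ≤ wl.length := Nat.one_le_iff_ne_zero.mpr hn0
    set n : Int := (wl.length : Int) with hn
    set t := pvIsqrtLoop (n - 1) wl.length 0 with ht
    have hts := pv_isqrt_spec (n - 1) wl.length 0
      (by simp; omega) (by push_cast; nlinarith [Int.natCast_pos.mpr (Nat.lt_of_lt_of_le Nat.zero_lt_one hn1)])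
    rw [← ht] at hts
    set pre := wl.take (t + 1) with hpre
    have htn : (t : Int) + 1 ≤ n := by nlinarith [hts.1, hts.2, hn]
    have htnn : t + 1 ≤ wl.length := by
      have h2 := htn; rw [hn] at h2; exact_mod_cast h2
    have hcut : pvCutLoop wl pre (PySem.List.pyRange ((t : Int) + 1) n 1) n
        = ((wl.takeWhile (fun c => pre.contains c)).length : Int) := by
      have hcast : ((t : Int) + 1) = ((t + 1 : Nat) : Int) := by push_cast; ring
      rw [hcast, hn]
      exact pv_cut_eq wl pre (wl.length - (t + 1)) (t + 1) rfl htnn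
        (fun j hj hj' => by
          rw [List.contains_iff_mem, hpre]
          exact List.mem_take_iff_getElem.mpr ⟨j, by omega, rfl⟩)
    rw [hcut]
    rw [pv_loop_eq wl wl []]
    simp only [List.nil_append, Int.toNat_natCast]
    rw [← List.prefix_iff_eq_take.mp (List.takeWhile_prefix (fun c => pre.contains c))]
    -- the two break conditions agree on members of wl
    have hidx : ∀ c ∈ wl, ((((PySem.List.index? wl c).getD 0 : Nat) : Int) *
        (((PySem.List.index? wl c).getD 0 : Nat) : Int) > n - 1 ↔ ¬ pre.contains c = true) := by
      intro c hc
      have hmem := pv_mem_take_iff wl (t + 1) c hc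
      rw [PySem.List.index?_eq_idxOf?]
      set j : Nat := ((List.idxOf? c wl).getD 0 : Nat)
      constructor
      · intro h hcp
        have hjt : j < t + 1 := hmem.mp (by rw [List.contains_iff_mem, hpre] at hcp; exact hcp)
        have hji : (j : Int) ≤ (t : Int) := by exact_mod_cast Nat.lt_succ_iff.mp hjt
        nlinarith [hts.1]
      · intro h
        have hjt : ¬ j < t + 1 := fun hj' => h (by
          rw [List.contains_iff_mem, hpre]; exact hmem.mpr hj')
        have hji : (t : Int) + 1 ≤ (j : Int) := by exact_mod_cast Nat.le_of_not_lt hjt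
        nlinarith [hts.2]
    have hpq : ∀ c ∈ wl,
        (!(decide ((((PySem.List.index? wl c).getD 0 : Nat) : Int) *
            (((PySem.List.index? wl c).getD 0 : Nat) : Int) > (wl.length : Int) - 1)))
          = pre.contains c := by
      intro c hc
      rw [← hn]
      cases hb : pre.contains c with
      | false =>
        have hgt := (hidx c hc).mpr (by rw [hb]; exact Bool.false_ne_true)
        rw [decide_eq_true hgt]
        rfl
      | true =>
        have hle : ¬ ((((PySem.List.index? wl c).getD 0 : Nat) : Int) *
            (((PySem.List.index? wl c).getD 0 : Nat) : Int) > n - 1) :=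
          fun hgt => (hidx c hc).mp hgt hb
        rw [decide_eq_false hle]
        rfl
    rw [pv_takeWhile_congr wl hpq]
    apply congrArg
    apply List.map_congr_left
    intro c hc
    have hcp : c ∈ pre := by
      have hm := List.mem_takeWhile_imp hc
      rw [List.contains_iff_mem] at hm; exact hm
    have hip : PySem.List.index? wl c = PySem.List.index? pre c := by
      conv_lhs => rw [← List.take_append_drop (t + 1) wl]
      exact PySem.List.index?_append_of_mem _ (by rw [hpre] at hcp; exact hcp)
    rw [hip]
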